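-- pv_equiv track=rewrite | github.com/vaibhavkkk/Data-Mining_Apriori_KCC_dataset | test.py | add_frequency
-- ===== SOURCE A (Python) =====
-- def add_frequency(Candidate, transactions):
--     s=""
--     v=0
--     for key in Candidate:
--         for t in transactions:
--             if key[0] in t and key[1] in t:
--                 if(v!=0):
--                     s=s+"^"
--                 s=s+"["+key[0]+" "+key[1]+","+str(1)+"]"
--                 v=v+1
--                 Candidate[key] += 1
-- #	        print "{0}\t{1}\t{2}".format(key[0],key[1],1)
-- #                print (key[0],key[1],1)
--
--     return s
-- ===== SOURCE B (Python) =====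
-- def add_frequency(Candidate, transactions):
--     # Vertical (tidset) representation: one pass builds an inverted index
--     # item -> set of transaction ids; a pair's support is the size of the
--     # intersection of the two tidsets (no per-candidate scan of transactions).
--     # Return-value equivalence; like A, mutates Candidate (by the same totals).
--     tids = {}
--     for i, t in enumerate(transactions):
--         for item in t:
--             tids.setdefault(item, set()).add(i)
--     empty = set()
--     parts = []
--     for key in list(Candidate):
--         c = len(tids.get(key[0], empty) & tids.get(key[1], empty))
--         Candidate[key] += c
--         parts += ["[" + key[0] + " " + key[1] + ",1]"] * c
--     return "^".join(parts)
-- ===== Notes on version B (the rewrite author's own statement) =====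
-- stated objective: alternative
-- what changed: Replaces A's nested candidate-by-transaction scan with Apriori's vertical representation: one pass builds an inverted index item->set of transaction ids, each pair's support is the size of the intersection of two tidsets, and the output entries are emitted by replication and joined once instead of A's interleaved concatenation with the separator flag v.
import Mathlib
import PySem

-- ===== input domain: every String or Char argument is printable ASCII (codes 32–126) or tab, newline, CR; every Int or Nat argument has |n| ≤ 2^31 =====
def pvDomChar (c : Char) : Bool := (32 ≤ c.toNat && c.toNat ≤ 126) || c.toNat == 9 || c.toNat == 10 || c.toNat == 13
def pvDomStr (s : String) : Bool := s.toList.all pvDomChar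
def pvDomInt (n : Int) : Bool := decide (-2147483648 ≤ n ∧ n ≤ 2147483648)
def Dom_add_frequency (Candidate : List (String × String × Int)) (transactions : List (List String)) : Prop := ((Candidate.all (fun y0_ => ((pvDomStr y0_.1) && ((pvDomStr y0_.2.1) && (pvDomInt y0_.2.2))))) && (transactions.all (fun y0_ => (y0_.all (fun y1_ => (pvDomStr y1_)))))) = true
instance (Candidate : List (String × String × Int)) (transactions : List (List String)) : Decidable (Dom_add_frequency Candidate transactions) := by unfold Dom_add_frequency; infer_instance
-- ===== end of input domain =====

-- B: vertical (tidset) representation — an inverted index item -> set of transaction ids built in one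
-- pass; each pair's support is the size of the intersection of two tidsets; entries emitted by
-- replication and joined once. Equivalence is about the RETURN value; in Python both A and B mutate
-- the Candidate dict by the same per-key totals.
-- ===== PORT A =====
def add_frequency (Candidate : List (String × String × Int)) (transactions : List (List String)) : String :=
  (Candidate.foldl (fun (sv : String × Int) key =>
      transactions.foldl (fun (sv : String × Int) t =>
        if t.contains key.1 && t.contains key.2.1 then
          let s := if sv.2 ≠ 0 then sv.1 ++ "^" else sv.1
          (s ++ "[" ++ key.1 ++ " " ++ key.2.1 ++ ",1]", sv.2 + 1)
        else sv) sv)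
    ("", (0 : Int))).1

-- ===== PORT B =====
-- inverted index: tids[item] = set of ids of the transactions containing item
-- (Python's tids.setdefault(item, set()).add(i) is d[item] = d.get(item, set()) with i added, i.e. Dict.modify)
def pvTids (transactions : List (List String)) : PySem.Dict String (PySem.Set Int) :=
  (PySem.List.enumerate transactions).foldl
    (fun d p => p.2.foldl
      (fun d item => PySem.Dict.modify d item PySem.Set.empty (fun s => PySem.Set.add s p.1)) d)
    PySem.Dict.empty

def add_frequency_alt (Candidate : List (String × String × Int)) (transactions : List (List String)) : String :=
  let tids := pvTids transactions
  let parts : List String := Candidate.foldl (fun (parts : List String) key =>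
      let c : Nat := (PySem.Set.inter (tids.getD key.1 PySem.Set.empty)
                                      (tids.getD key.2.1 PySem.Set.empty)).length
      parts ++ List.replicate c ("[" ++ key.1 ++ " " ++ key.2.1 ++ ",1]")) []
  PySem.Str.join "^" parts

-- ===== PRECONDITION & SPEC =====
def Spec_add_frequency (Candidate : List (String × String × Int)) (transactions : List (List String)) (out : String) : Prop := out = add_frequency_alt Candidate transactions
instance (Candidate : List (String × String × Int)) (transactions : List (List String)) (out : String) : Decidable (Spec_add_frequency Candidate transactions out) := by unfold Spec_add_frequency; infer_instance

-- ===== CLAIM (what is proved, stated in full; the proofs are below) =====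
def Claim_equal_add_frequency : Prop := ∀ (Candidate : List (String × String × Int)) (transactions : List (List String)), Dom_add_frequency Candidate transactions → Spec_add_frequency Candidate transactions (add_frequency Candidate transactions)

-- ===== LEMMAS AND PROOFS =====

-- ---- A-side: A's interleaved loop produces the join of replicated entries ----

-- Chars-level: joining after appending one part
theorem joinC_append_singleton (sep : List Char) (P : List (List Char)) (x : List Char) :
    PySem.Chars.join sep (P ++ [x]) =
      (if P = [] then [] else PySem.Chars.join sep P ++ sep) ++ x := by
  induction P with
  | nil => simp [PySem.Chars.join_singleton]
  | cons p P ih =>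
    cases P with
    | nil => simp [PySem.Chars.join_cons_cons, PySem.Chars.join_singleton]
    | cons q rest =>
      have h1 : (p :: q :: rest) ++ [x] = p :: ((q :: rest) ++ [x]) := rfl
      have h2 : ((q :: rest) : List (List Char)) ++ [x] = q :: (rest ++ [x]) := rfl
      rw [h1, h2, PySem.Chars.join_cons_cons, ← h2, ih]
      simp [PySem.Chars.join_cons_cons, List.append_assoc]

-- String-level version, stated with the Int length used by A's flag v
theorem join_append_singleton (L : List String) (e : String) :
    PySem.Str.join "^" (L ++ [e]) =
      (if (L.length : Int) ≠ 0 then PySem.Str.join "^" L ++ "^" else PySem.Str.join "^" L) ++ e := by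
  apply String.toList_inj.mp
  by_cases h : L = [] <;>
    simp [PySem.Str.toList_join, joinC_append_singleton, h, List.map_eq_nil_iff]

-- A's inner loop from a join-shaped state
theorem inner_loop_eq (key : String × String × Int) (ts : List (List String)) (L : List String) :
    ts.foldl (fun (sv : String × Int) t =>
        if t.contains key.1 && t.contains key.2.1 then
          ((if sv.2 ≠ 0 then sv.1 ++ "^" else sv.1) ++ "[" ++ key.1 ++ " " ++ key.2.1 ++ ",1]", sv.2 + 1)
        else sv)
      (PySem.Str.join "^" L, (L.length : Int)) =
      (PySem.Str.join "^" (L ++ List.replicate (ts.countP (fun t => t.contains key.1 && t.contains key.2.1))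
          ("[" ++ key.1 ++ " " ++ key.2.1 ++ ",1]")),
       (L.length : Int) + ts.countP (fun t => t.contains key.1 && t.contains key.2.1)) := by
  induction ts generalizing L with
  | nil => simp
  | cons t ts ih =>
    by_cases h : (t.contains key.1 && t.contains key.2.1) = true
    · have step : ((if (L.length : Int) ≠ 0 then PySem.Str.join "^" L ++ "^" else PySem.Str.join "^" L)
          ++ "[" ++ key.1 ++ " " ++ key.2.1 ++ ",1]", (L.length : Int) + 1) =
          (PySem.Str.join "^" (L ++ ["[" ++ key.1 ++ " " ++ key.2.1 ++ ",1]"]),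
           ((L ++ ["[" ++ key.1 ++ " " ++ key.2.1 ++ ",1]"]).length : Int)) := by
        rw [join_append_singleton]
        simp [String.append_assoc]
      simp only [List.foldl_cons, h, if_pos, List.countP_cons]
      rw [step, ih]
      have hlist : L ++ ["[" ++ key.1 ++ " " ++ key.2.1 ++ ",1]"] ++
          List.replicate (List.countP (fun t => t.contains key.1 && t.contains key.2.1) ts)
            ("[" ++ key.1 ++ " " ++ key.2.1 ++ ",1]") =
          L ++ List.replicate (List.countP (fun t => t.contains key.1 && t.contains key.2.1) ts + 1)
            ("[" ++ key.1 ++ " " ++ key.2.1 ++ ",1]") := by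
        simp [List.append_assoc, List.replicate_succ]
      rw [hlist]
      exact congrArg₂ Prod.mk rfl (by simp only [List.length_append, List.length_singleton]; push_cast; ring)
    · simp only [List.foldl_cons, h, List.countP_cons]
      rw [if_neg (by simp), ih]
      simp

-- A's outer loop from a join-shaped state equals join of accumulated replicated parts
theorem outer_loop_eq (ts : List (List String)) (C : List (String × String × Int)) (L : List String) :
    C.foldl (fun (sv : String × Int) key =>
        ts.foldl (fun (sv : String × Int) t =>
          if t.contains key.1 && t.contains key.2.1 then
            ((if sv.2 ≠ 0 then sv.1 ++ "^" else sv.1) ++ "[" ++ key.1 ++ " " ++ key.2.1 ++ ",1]", sv.2 + 1)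
          else sv) sv)
      (PySem.Str.join "^" L, (L.length : Int)) =
      (PySem.Str.join "^" (L ++ C.flatMap (fun key =>
          List.replicate (ts.countP (fun t => t.contains key.1 && t.contains key.2.1))
            ("[" ++ key.1 ++ " " ++ key.2.1 ++ ",1]"))),
       ((L ++ C.flatMap (fun key =>
          List.replicate (ts.countP (fun t => t.contains key.1 && t.contains key.2.1))
            ("[" ++ key.1 ++ " " ++ key.2.1 ++ ",1]"))).length : Int)) := by
  induction C generalizing L with
  | nil => simp
  | cons key C ih =>
    simp only [List.foldl_cons]
    rw [inner_loop_eq]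
    have hlen : (L.length : Int) + (ts.countP (fun t => t.contains key.1 && t.contains key.2.1)) =
        (((L ++ List.replicate (ts.countP (fun t => t.contains key.1 && t.contains key.2.1))
            ("[" ++ key.1 ++ " " ++ key.2.1 ++ ",1]")).length : Int)) := by
      simp
    rw [hlen, ih]
    simp [List.append_assoc]

-- ---- B-side: the tidset index counts exactly A's matches ----

-- effect of one transaction's inner loop on one tidset
theorem tids_inner (t : List String) (d : PySem.Dict String (PySem.Set Int)) (i : Int) (k : String) :
    (t.foldl (fun d item => PySem.Dict.modify d item PySem.Set.empty (fun s => PySem.Set.add s i)) d).getD k PySem.Set.empty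
      = if t.contains k then PySem.Set.add (d.getD k PySem.Set.empty) i
        else d.getD k PySem.Set.empty := by
  induction t generalizing d with
  | nil => simp
  | cons x t ih =>
    simp only [List.foldl_cons]
    rw [ih, PySem.Dict.getD_modify]
    by_cases hkx : k = x
    · by_cases hkt : t.contains k = true <;>
        simp [hkx]
    · by_cases hkt : t.contains k = true <;>
        simp [hkx]

-- appending one transaction to the index
theorem tids_append (ts : List (List String)) (t : List String) (k : String) :
    (pvTids (ts ++ [t])).getD k PySem.Set.empty
      = if t.contains k then PySem.Set.add ((pvTids ts).getD k PySem.Set.empty) (ts.length : Int)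
        else (pvTids ts).getD k PySem.Set.empty := by
  unfold pvTids
  rw [PySem.List.enumerate_append, List.foldl_append]
  simp only [PySem.List.enumerate_cons, PySem.List.enumerate_nil, List.foldl_cons, List.foldl_nil]
  rw [tids_inner]
  norm_num

-- every stored transaction id is in range
theorem tids_bound (ts : List (List String)) (k : String) :
    ∀ i ∈ (pvTids ts).getD k PySem.Set.empty, 0 ≤ i ∧ i < (ts.length : Int) := by
  induction ts using List.reverseRecOn with
  | nil => intro i hi; simp [pvTids, PySem.List.enumerate_nil] at hi
  | append_singleton ts t ih =>
    intro i hi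
    have hlen : ((ts ++ [t]).length : Int) = (ts.length : Int) + 1 := by
      simp only [List.length_append, List.length_cons, List.length_nil]; push_cast; ring
    rw [tids_append] at hi
    rw [hlen]
    by_cases h : t.contains k = true
    · rw [if_pos h] at hi
      rcases (PySem.Set.mem_add _ _ _).mp hi with h' | h'
      · have := ih i h'; omega
      · subst h'; omega
    · rw [if_neg h] at hi
      have := ih i hi; omega

-- the size of the intersection of two tidsets is A's match count
theorem tids_inter_count (ts : List (List String)) (k0 k1 : String) :
    (PySem.Set.inter ((pvTids ts).getD k0 PySem.Set.empty) ((pvTids ts).getD k1 PySem.Set.empty)).length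
      = ts.countP (fun t => t.contains k0 && t.contains k1) := by
  induction ts using List.reverseRecOn with
  | nil => simp [pvTids, PySem.List.enumerate_nil, PySem.Set.inter]
  | append_singleton ts t ih =>
    have hb0 := tids_bound ts k0
    have hb1 := tids_bound ts k1
    have hn0 : (ts.length : Int) ∉ (pvTids ts).getD k0 PySem.Set.empty := by
      intro h; have := hb0 _ h; omega
    have hn1 : (ts.length : Int) ∉ (pvTids ts).getD k1 PySem.Set.empty := by
      intro h; have := hb1 _ h; omega
    -- membership of old ids in the (possibly extended) second tidset is unchanged
    have hfilter : ∀ (S1 : PySem.Set Int),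
        List.filter (fun x => (S1 ++ [(ts.length : Int)]).contains x) ((pvTids ts).getD k0 PySem.Set.empty)
          = List.filter (fun x => S1.contains x) ((pvTids ts).getD k0 PySem.Set.empty) := by
      intro S1
      apply List.filter_congr
      intro x hx
      have hxlt := hb0 _ hx
      have : x ≠ (ts.length : Int) := by omega
      simp [this]
    rw [tids_append, tids_append, List.countP_append]
    by_cases h0 : t.contains k0 = true <;> by_cases h1 : t.contains k1 = true
    · have m0 : k0 ∈ t := by simpa using h0
      have m1 : k1 ∈ t := by simpa using h1
      have hc : List.countP (fun t => t.contains k0 && t.contains k1) [t] = 1 := by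
        simp [m0, m1]
      rw [if_pos h0, if_pos h1,
        PySem.Set.add_of_not_mem hn0, PySem.Set.add_of_not_mem hn1, hc]
      simp only [PySem.Set.inter] at ih ⊢
      rw [List.filter_append, hfilter, List.length_append, ih]
      have h2 : (List.filter
          (fun x => ((pvTids ts).getD k1 PySem.Set.empty ++ [(ts.length : Int)]).contains x)
          [(ts.length : Int)]).length = 1 := by
        simp
      rw [h2]
    · have m1 : k1 ∉ t := by simpa using h1
      have hc : List.countP (fun t => t.contains k0 && t.contains k1) [t] = 0 := by
        simp [m1]
      rw [if_pos h0, if_neg h1, PySem.Set.add_of_not_mem hn0, hc]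
      simp only [PySem.Set.inter] at ih ⊢
      rw [List.filter_append, List.length_append, ih]
      have h2 : (List.filter (fun x => ((pvTids ts).getD k1 PySem.Set.empty).contains x)
          [(ts.length : Int)]).length = 0 := by
        simp
        exact hn1
      rw [h2]
    · have m0 : k0 ∉ t := by simpa using h0
      have hc : List.countP (fun t => t.contains k0 && t.contains k1) [t] = 0 := by
        simp [m0]
      rw [if_neg h0, if_pos h1, PySem.Set.add_of_not_mem hn1, hc]
      simp only [PySem.Set.inter] at ih ⊢
      rw [hfilter, ih]
      omega
    · have m0 : k0 ∉ t := by simpa using h0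
      have hc : List.countP (fun t => t.contains k0 && t.contains k1) [t] = 0 := by
        simp [m0]
      rw [if_neg h0, if_neg h1, hc, ih]
      omega

-- ===== VERDICT (by name: the statement is the Claim_ definition above) =====
theorem add_frequency_spec : Claim_equal_add_frequency := by
  intro C ts _
  unfold Spec_add_frequency add_frequency add_frequency_alt
  have h0 : (("" : String), (0 : Int)) = (PySem.Str.join "^" ([] : List String), (([] : List String).length : Int)) := by
    simp [PySem.Str.join, PySem.Chars.join_nil]
  rw [h0, outer_loop_eq]
  simp only [tids_inter_count]
  rw [PySem.List.foldl_append_eq_flatMap]
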